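-- pv_equiv track=rewrite | github.com/WalaaAlkady/Bioinformatics | BruijnGraph.py | prefixSuffix
-- ===== SOURCE A (Python) =====
-- def prefixSuffix(reads):
--     #finds prefix suffix dictionary of single reads
--     prefixSuffix={}
--     length=len(reads[0])-1
--     for i in range (len(reads)):
--         prefix=reads[i]
--         key=prefix[0:length]
--         if key in prefixSuffix:
--             prefixSuffix[key].append(prefix[1:])
--         else:
--             prefixSuffix[prefix[0:length]]=[]
--             prefixSuffix[prefix[0:length]].append(prefix[1:])
--     return prefixSuffix
-- ===== SOURCE B (Python) =====
-- def prefixSuffix(reads):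
--     # group suffixes per distinct prefix: dedup the keys first, then one
--     # filtering pass per distinct key (instead of A's incremental append)
--     length = len(reads[0]) - 1
--     keys = []
--     for r in reads:
--         k = r[0:length]
--         if k not in keys:
--             keys.append(k)
--     return {k: [r[1:] for r in reads if r[0:length] == k] for k in keys}
-- ===== Notes on version B (the rewrite author's own statement) =====
-- stated objective: alternative
-- what changed: Replaces A's incremental dict scan-and-append with a two-phase grouping: dedup the prefix keys in first-occurrence order, then build each suffix list by one filtering pass over the reads per distinct key.
import Mathlib
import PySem

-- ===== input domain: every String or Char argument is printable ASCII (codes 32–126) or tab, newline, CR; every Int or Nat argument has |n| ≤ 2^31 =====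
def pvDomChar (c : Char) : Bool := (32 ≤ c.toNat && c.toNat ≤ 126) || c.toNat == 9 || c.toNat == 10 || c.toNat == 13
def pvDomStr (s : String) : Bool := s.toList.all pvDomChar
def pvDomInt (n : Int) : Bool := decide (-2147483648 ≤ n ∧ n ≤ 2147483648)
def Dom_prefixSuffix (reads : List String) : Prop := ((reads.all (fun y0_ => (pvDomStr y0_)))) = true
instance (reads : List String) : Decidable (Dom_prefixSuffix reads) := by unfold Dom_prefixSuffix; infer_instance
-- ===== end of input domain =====

-- B groups suffixes per distinct prefix by first deduplicating the keys and then doing one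
-- filtering pass over the reads per distinct key, instead of A's incremental scan-and-append (objective: alternative).

-- shared primitive expressions of both Pythons: len(reads[0]) - 1, r[0:length], r[1:]
def pvLen (reads : List String) : Int := PySem.Str.len (PySem.List.pyGetD reads 0 "") - 1
def pvKey (length : Int) (r : String) : String := PySem.Str.slice r (some 0) (some length)
def pvSuf (r : String) : String := PySem.Str.slice r (some 1) none

-- ===== PORT A =====
-- loop body: if key in dict: append; else: dict[key] = []; append
def prefixSuffixStep (length : Int) (d : PySem.Dict String (List String)) (pre : String) :
    PySem.Dict String (List String) :=
  let key := pvKey length pre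
  if d.contains key then d.modify key [] (fun v => v ++ [pvSuf pre])
  else ((d.insert (pvKey length pre) ([] : List String)).modify (pvKey length pre) []
    (fun v => v ++ [pvSuf pre]))

def prefixSuffix (reads : List String) : List (String × List String) :=
  -- for i in range(len(reads)): prefix = reads[i]; …  (reads[0] in range under Pre_: reads ≠ [])
  ((PySem.List.pyRange 0 (PySem.List.len reads) 1).foldl
    (fun d i => prefixSuffixStep (pvLen reads) d (PySem.List.pyGetD reads i ""))
    PySem.Dict.empty).items

-- ===== PORT B =====
def prefixSuffix_alt (reads : List String) : List (String × List String) :=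
  -- keys = []; for r in reads: k = r[0:length]; if k not in keys: keys.append(k)
  -- then {k: [r[1:] for r in reads if r[0:length] == k] for k in keys}
  ((reads.foldl (fun ks r =>
      let k := pvKey (pvLen reads) r
      if ks.contains k then ks else ks ++ [k]) ([] : List String)).foldl
    (fun d k => d.insert k ((reads.filter (fun r => pvKey (pvLen reads) r == k)).map pvSuf))
    PySem.Dict.empty).items

-- ===== PRECONDITION & SPEC =====
-- Pre_ excludes only the empty list, on which A raises IndexError at reads[0].
def Pre_prefixSuffix (reads : List String) : Prop := reads ≠ []
instance (reads : List String) : Decidable (Pre_prefixSuffix reads) := by unfold Pre_prefixSuffix; infer_instance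
def pvWitness_prefixSuffix : List String := ["ab", "bb", "ab"]

def Spec_prefixSuffix (reads : List String) (out : List (String × List String)) : Prop := out = prefixSuffix_alt reads
instance (reads : List String) (out : List (String × List String)) : Decidable (Spec_prefixSuffix reads out) := by unfold Spec_prefixSuffix; infer_instance

-- ===== CLAIM (what is proved, stated in full; the proofs are below) =====
def Claim_equal_prefixSuffix : Prop := ∀ (reads : List String), Dom_prefixSuffix reads → Pre_prefixSuffix reads → Spec_prefixSuffix reads (prefixSuffix reads)

-- ===== LEMMAS AND PROOFS =====

-- A's two branches both amount to a single Dict.modify (append at key).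
theorem stepA_eq_modify (L : Int) (d : PySem.Dict String (List String)) (pre : String) :
    prefixSuffixStep L d pre = d.modify (pvKey L pre) [] (fun v => v ++ [pvSuf pre]) := by
  unfold prefixSuffixStep
  by_cases h : d.contains (pvKey L pre) = true
  · simp [h]
  · simp only [Bool.not_eq_true] at h
    simp only [h, Bool.false_eq_true, if_false]
    show (d.insert (pvKey L pre) []).insert (pvKey L pre)
        (((d.insert (pvKey L pre) []).getD (pvKey L pre) []) ++ [pvSuf pre])
      = d.insert (pvKey L pre) ((d.getD (pvKey L pre) []) ++ [pvSuf pre])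
    rw [PySem.Dict.getD_insert_self, PySem.Dict.insert_insert_self,
        PySem.Dict.getD_of_not_contains d [] h]

-- both programs produce the distinct keys in first-occurrence order, each with its filtered suffixes
theorem prefixSuffix_eq_group (reads : List String) :
    prefixSuffix reads
      = (PySem.Set.ofList (reads.map (pvKey (pvLen reads)))).map
          (fun k => (k, (reads.filter (fun r => pvKey (pvLen reads) r == k)).map pvSuf)) := by
  unfold prefixSuffix
  rw [PySem.List.foldl_pyRange_pyGetD reads "" _ _ (le_refl 0)]
  simp only [Int.toNat_zero, List.drop_zero]
  have hstep : prefixSuffixStep (pvLen reads)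
      = fun d pre => d.modify (pvKey (pvLen reads) pre) [] (fun v => v ++ [pvSuf pre]) := by
    funext d pre; exact stepA_eq_modify (pvLen reads) d pre
  rw [hstep]
  have hnd : (reads.foldl (fun d pre => d.modify (pvKey (pvLen reads) pre) []
        (fun v => v ++ [pvSuf pre])) PySem.Dict.empty).keys.Nodup :=
    PySem.Dict.nodup_keys_foldl_modify_key reads (pvKey (pvLen reads)) []
      (fun d x v => v ++ [pvSuf x]) PySem.Dict.empty PySem.Dict.nodup_keys_empty
  rw [PySem.Dict.items_eq_map_keys _ hnd []]
  have hkeys : (reads.foldl (fun d pre => d.modify (pvKey (pvLen reads) pre) []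
        (fun v => v ++ [pvSuf pre])) PySem.Dict.empty).keys
      = PySem.Set.ofList (reads.map (pvKey (pvLen reads))) := by
    rw [PySem.Dict.keys_foldl_modify_key reads (pvKey (pvLen reads)) []
      (fun d x v => v ++ [pvSuf x]) PySem.Dict.empty]
    rw [PySem.Dict.keys_empty]
    rfl
  rw [hkeys]
  apply List.map_congr_left
  intro k _
  congr 1
  have hfm : reads.foldl (fun d pre => d.modify (pvKey (pvLen reads) pre) []
        (fun v => v ++ [pvSuf pre])) PySem.Dict.empty
      = (reads.map (fun r => (pvKey (pvLen reads) r, pvSuf r))).foldl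
          (fun d p => d.modify p.1 [] (fun v => v ++ [p.2])) PySem.Dict.empty :=
    (List.foldl_map (f := fun r => (pvKey (pvLen reads) r, pvSuf r))
      (g := fun (d : PySem.Dict String (List String)) (p : String × String) =>
        d.modify p.1 [] (fun v => v ++ [p.2]))
      (l := reads) (init := PySem.Dict.empty)).symm
  rw [hfm, PySem.Dict.getD_foldl_modify_append, PySem.Dict.getD_empty, List.nil_append,
    List.filter_map, List.map_map]
  rfl

theorem prefixSuffix_alt_eq_group (reads : List String) :
    prefixSuffix_alt reads
      = (PySem.Set.ofList (reads.map (pvKey (pvLen reads)))).map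
          (fun k => (k, (reads.filter (fun r => pvKey (pvLen reads) r == k)).map pvSuf)) := by
  unfold prefixSuffix_alt
  have hkeys : (reads.foldl (fun ks r =>
        let k := pvKey (pvLen reads) r
        if ks.contains k then ks else ks ++ [k]) ([] : List String))
      = PySem.Set.ofList (reads.map (pvKey (pvLen reads))) := by
    rw [PySem.Set.ofList_eq_foldl, List.foldl_map]
    rfl
  rw [hkeys]
  rw [PySem.Dict.items_foldl_insert_fresh (PySem.Set.ofList (reads.map (pvKey (pvLen reads)))) (fun a => a)
      (fun k => (reads.filter (fun r => pvKey (pvLen reads) r == k)).map pvSuf)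
      PySem.Dict.empty (by intro a _; exact PySem.Dict.contains_empty a)
      (by simp [PySem.Set.nodup_ofList (reads.map (pvKey (pvLen reads)))])]
  simp [PySem.Dict.empty]

-- ===== VERDICT (by name: the statement is the Claim_ definition above) =====
theorem prefixSuffix_spec : Claim_equal_prefixSuffix := by
  intro reads _ _
  unfold Spec_prefixSuffix
  rw [prefixSuffix_eq_group, prefixSuffix_alt_eq_group]
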